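-- pv_equiv track=rewrite | github.com/jmartinmatias/GOAF | src/core/registry.py | _extract_patterns_from_query
-- ===== SOURCE A (Python) =====
-- from typing import Dict, Any, Callable, List, Optional, Union
--
-- def _extract_patterns_from_query(query: str) -> Dict[str, bool]:
--     """
--     Extract likely code patterns from a natural language query.
--
--     Args:
--         query: The natural language query
--
--     Returns:
--         Dictionary of likely code patterns based on query
--     """
--     patterns = {}
--
--     # Look for transformation hints
--     if any(term in query.lower() for term in ["calculate", "compute", "add", "sum", "multiply"]):
--         patterns["transforms_data"] = True
--
--     # Look for filtering hints
--     if any(term in query.lower() for term in ["filter", "find", "where", "condition"]):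
--         patterns["filters_data"] = True
--
--     # Look for I/O hints
--     if any(term in query.lower() for term in ["file", "read", "write", "save", "load"]):
--         patterns["performs_io"] = True
--
--     # Look for error handling hints
--     if any(term in query.lower() for term in ["error", "exception", "handle", "try"]):
--         patterns["handles_errors"] = True
--
--     # Look for string processing hints
--     if any(term in query.lower() for term in ["string", "text", "format", "concat"]):
--         patterns["manipulates_strings"] = True
--
--     # Look for list processing hints
--     if any(term in query.lower() for term in ["list", "array", "collection", "items"]):
--         patterns["uses_functional_patterns"] = True
--
--     return patterns
-- ===== SOURCE B (Python) =====
-- # B: a single position-driven scan of the lowered query (naive multi-pattern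
-- # matcher over a flat keyword->category table), then the hit categories are
-- # emitted in the canonical key order.  Correct because a nonempty keyword is a
-- # substring of q iff it starts at some position i < len(q).
--
-- _KEYWORD_KEY = [
--     ("calculate", "transforms_data"), ("compute", "transforms_data"),
--     ("add", "transforms_data"), ("sum", "transforms_data"),
--     ("multiply", "transforms_data"),
--     ("filter", "filters_data"), ("find", "filters_data"),
--     ("where", "filters_data"), ("condition", "filters_data"),
--     ("file", "performs_io"), ("read", "performs_io"),
--     ("write", "performs_io"), ("save", "performs_io"), ("load", "performs_io"),
--     ("error", "handles_errors"), ("exception", "handles_errors"),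
--     ("handle", "handles_errors"), ("try", "handles_errors"),
--     ("string", "manipulates_strings"), ("text", "manipulates_strings"),
--     ("format", "manipulates_strings"), ("concat", "manipulates_strings"),
--     ("list", "uses_functional_patterns"), ("array", "uses_functional_patterns"),
--     ("collection", "uses_functional_patterns"),
--     ("items", "uses_functional_patterns"),
-- ]
--
-- _KEYS = ["transforms_data", "filters_data", "performs_io", "handles_errors",
--          "manipulates_strings", "uses_functional_patterns"]
--
--
-- def _extract_patterns_from_query(query: str):
--     q = query.lower()
--     hit = set()
--     for i in range(len(q)):
--         for kw, key in _KEYWORD_KEY: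
--             if q.startswith(kw, i):
--                 hit.add(key)
--     return {k: True for k in _KEYS if k in hit}
-- ===== Notes on version B (the rewrite author's own statement) =====
-- stated objective: alternative
-- what changed: Instead of six per-category any-substring tests, B runs one position-driven scan of the lowered query against a flat keyword->category table (naive multi-pattern matching into a hit set) and then emits the hit categories in the canonical key order.
import Mathlib
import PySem

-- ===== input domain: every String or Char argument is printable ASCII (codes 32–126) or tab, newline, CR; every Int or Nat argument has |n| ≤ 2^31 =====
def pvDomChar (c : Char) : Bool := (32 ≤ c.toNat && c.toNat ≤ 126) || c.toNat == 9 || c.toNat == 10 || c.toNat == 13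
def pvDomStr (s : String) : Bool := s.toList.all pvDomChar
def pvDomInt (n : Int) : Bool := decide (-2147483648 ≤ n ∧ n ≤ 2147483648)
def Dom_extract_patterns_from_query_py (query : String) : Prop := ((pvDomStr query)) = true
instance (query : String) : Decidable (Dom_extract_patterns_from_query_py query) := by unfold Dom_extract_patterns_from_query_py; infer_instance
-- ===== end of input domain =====

-- B replaces A's six per-category any-substring tests by one position-driven scan of the
-- lowered query against a flat keyword->category table, emitting hit categories in key order
-- (alternative algorithm, same asymptotic cost).


-- ===== PORT A =====
def extract_patterns_from_query_py (query : String) : List (String × Bool) :=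
  let patterns : PySem.Dict String Bool := PySem.Dict.empty
  let patterns := if ["calculate", "compute", "add", "sum", "multiply"].any
      (fun term => PySem.Str.isIn term (PySem.Str.lower query)) then
      patterns.insert "transforms_data" true else patterns
  let patterns := if ["filter", "find", "where", "condition"].any
      (fun term => PySem.Str.isIn term (PySem.Str.lower query)) then
      patterns.insert "filters_data" true else patterns
  let patterns := if ["file", "read", "write", "save", "load"].any
      (fun term => PySem.Str.isIn term (PySem.Str.lower query)) then
      patterns.insert "performs_io" true else patterns
  let patterns := if ["error", "exception", "handle", "try"].any
      (fun term => PySem.Str.isIn term (PySem.Str.lower query)) then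
      patterns.insert "handles_errors" true else patterns
  let patterns := if ["string", "text", "format", "concat"].any
      (fun term => PySem.Str.isIn term (PySem.Str.lower query)) then
      patterns.insert "manipulates_strings" true else patterns
  let patterns := if ["list", "array", "collection", "items"].any
      (fun term => PySem.Str.isIn term (PySem.Str.lower query)) then
      patterns.insert "uses_functional_patterns" true else patterns
  patterns.items

-- ===== PORT B =====
-- Source B's flat keyword -> category table
def pvKeywordKey : List (String × String) :=
  [("calculate", "transforms_data"), ("compute", "transforms_data"),
   ("add", "transforms_data"), ("sum", "transforms_data"),
   ("multiply", "transforms_data"),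
   ("filter", "filters_data"), ("find", "filters_data"),
   ("where", "filters_data"), ("condition", "filters_data"),
   ("file", "performs_io"), ("read", "performs_io"),
   ("write", "performs_io"), ("save", "performs_io"), ("load", "performs_io"),
   ("error", "handles_errors"), ("exception", "handles_errors"),
   ("handle", "handles_errors"), ("try", "handles_errors"),
   ("string", "manipulates_strings"), ("text", "manipulates_strings"),
   ("format", "manipulates_strings"), ("concat", "manipulates_strings"),
   ("list", "uses_functional_patterns"), ("array", "uses_functional_patterns"),
   ("collection", "uses_functional_patterns"),
   ("items", "uses_functional_patterns")]

def pvKeys : List String :=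
  ["transforms_data", "filters_data", "performs_io", "handles_errors",
   "manipulates_strings", "uses_functional_patterns"]

def extract_patterns_from_query_py_alt (query : String) : List (String × Bool) :=
  let q := PySem.Str.lower query
  -- for i in range(len(q)): for kw, key in _KEYWORD_KEY: if q.startswith(kw, i): hit.add(key)
  -- q.startswith(kw, i) with 0 ≤ i is exactly: kw.toList is a prefix of q.toList.drop i
  let hit : PySem.Set String :=
    (List.range q.toList.length).foldl
      (fun hit i =>
        pvKeywordKey.foldl
          (fun hit kv =>
            if PySem.Chars.startswith (q.toList.drop i) kv.1.toList then
              PySem.Set.add hit kv.2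
            else hit)
          hit)
      PySem.Set.empty
  -- {k: True for k in _KEYS if k in hit}
  ((pvKeys.filter (fun k => PySem.Set.contains hit k)).foldl
      (fun d k => d.insert k true) PySem.Dict.empty).items

-- ===== PRECONDITION & SPEC =====
def Spec_extract_patterns_from_query_py (query : String) (out : List (String × Bool)) : Prop := out = extract_patterns_from_query_py_alt query
instance (query : String) (out : List (String × Bool)) : Decidable (Spec_extract_patterns_from_query_py query out) := by unfold Spec_extract_patterns_from_query_py; infer_instance

-- ===== CLAIM (what is proved, stated in full; the proofs are below) =====
def Claim_equal_extract_patterns_from_query_py : Prop := ∀ (query : String), Dom_extract_patterns_from_query_py query → Spec_extract_patterns_from_query_py query (extract_patterns_from_query_py query)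

-- ===== LEMMAS AND PROOFS =====

-- membership in the inner fold (one text position, all keywords)
theorem pv_mem_foldl_if_add (l : List (String × String)) (P : String × String → Bool)
    (s : PySem.Set String) (x : String) :
    (x ∈ l.foldl (fun s kv => if P kv then PySem.Set.add s kv.2 else s) s) ↔
      x ∈ s ∨ ∃ kv ∈ l, P kv ∧ x = kv.2 := by
  induction l generalizing s with
  | nil => simp
  | cons a t ih =>
    simp only [List.foldl_cons, ih]
    by_cases h : P a = true
    · simp [h, PySem.Set.mem_add]
      tauto
    · simp [h]
      try tauto

-- membership in the outer fold (all text positions)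
theorem pv_mem_foldl2 (idxs : List ℕ) (L : List Char) (s : PySem.Set String) (x : String) :
    (x ∈ idxs.foldl
        (fun hit i =>
          pvKeywordKey.foldl
            (fun hit kv =>
              if PySem.Chars.startswith (L.drop i) kv.1.toList then PySem.Set.add hit kv.2
              else hit)
            hit)
        s) ↔
      x ∈ s ∨ ∃ i ∈ idxs, ∃ kv ∈ pvKeywordKey,
        PySem.Chars.startswith (L.drop i) kv.1.toList ∧ x = kv.2 := by
  induction idxs generalizing s with
  | nil => simp
  | cons a t ih =>
    simp only [List.foldl_cons, ih, pv_mem_foldl_if_add]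
    constructor
    · rintro (⟨h | ⟨kv, hkv, hP, hx⟩⟩ | ⟨i, hi, kv, hkv, hP, hx⟩)
      · exact Or.inl h
      · exact Or.inr ⟨a, by simp, kv, hkv, hP, hx⟩
      · exact Or.inr ⟨i, by simp [hi], kv, hkv, hP, hx⟩
    · rintro (h | ⟨i, hi, kv, hkv, hP, hx⟩)
      · exact Or.inl (Or.inl h)
      · rcases List.mem_cons.1 hi with rfl | hi
        · exact Or.inl (Or.inr ⟨kv, hkv, hP, hx⟩)
        · exact Or.inr ⟨i, hi, kv, hkv, hP, hx⟩

-- a nonempty keyword occurs at some position i < len(L) iff it is a substring of L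
theorem pv_exists_startswith_iff (L t : List Char) (ht : t ≠ []) :
    (∃ i ∈ List.range L.length, PySem.Chars.startswith (L.drop i) t = true) ↔
      PySem.Chars.isIn t L = true := by
  rw [← PySem.Chars.exists_prefix_drop_iff_isIn]
  constructor
  · rintro ⟨i, _, h⟩
    exact ⟨i, (PySem.Chars.startswith_iff _ _).1 h⟩
  · rintro ⟨j, hj⟩
    have hjlt : j < L.length := by
      by_contra hge
      have : L.drop j = [] := List.drop_eq_nil_of_le (by omega)
      rw [this] at hj
      exact ht (List.prefix_nil.1 hj)
    exact ⟨j, List.mem_range.2 hjlt, (PySem.Chars.startswith_iff _ _).2 hj⟩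

-- items of a fresh insert-true loop over a duplicate-free key list
theorem pv_items_fold (ks : List String) (hnd : ks.Nodup) :
    ((ks.foldl (fun d k => d.insert k true) PySem.Dict.empty).items) =
      ks.map (fun k => (k, true)) := by
  have := PySem.Dict.items_foldl_insert_fresh (l := ks) (k := fun x => x)
    (v := fun _ => true) (d := PySem.Dict.empty)
    (by intro a _; simp) (by simpa using hnd)
  simpa using this

-- the common shape of both results, as a function of the six category booleans
def pvOut (b1 b2 b3 b4 b5 b6 : Bool) : List (String × Bool) :=
  (if b1 then [("transforms_data", true)] else []) ++
  (if b2 then [("filters_data", true)] else []) ++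
  (if b3 then [("performs_io", true)] else []) ++
  (if b4 then [("handles_errors", true)] else []) ++
  (if b5 then [("manipulates_strings", true)] else []) ++
  (if b6 then [("uses_functional_patterns", true)] else [])

-- a category key is in the hit set iff some of its keywords is a substring of q
theorem pv_hit_contains (q : String) (x : String) :
    (PySem.Set.contains
      ((List.range q.toList.length).foldl
        (fun hit i =>
          pvKeywordKey.foldl
            (fun hit kv =>
              if PySem.Chars.startswith (q.toList.drop i) kv.1.toList then
                PySem.Set.add hit kv.2
              else hit)
            hit)
        PySem.Set.empty) x = true)
    ↔ ∃ kv ∈ pvKeywordKey, x = kv.2 ∧ PySem.Chars.isIn kv.1.toList q.toList = true := by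
  rw [PySem.Set.contains_iff, pv_mem_foldl2]
  have hne : ∀ kv ∈ pvKeywordKey, kv.1.toList ≠ [] := by decide
  constructor
  · rintro (h | ⟨i, hi, kv, hkv, hsw, hx⟩)
    · simp [PySem.Set.empty] at h
    · exact ⟨kv, hkv, hx,
        (pv_exists_startswith_iff q.toList _ (hne kv hkv)).1 ⟨i, hi, hsw⟩⟩
  · rintro ⟨kv, hkv, hx, hin⟩
    obtain ⟨i, hi, hsw⟩ := (pv_exists_startswith_iff q.toList _ (hne kv hkv)).2 hin
    exact Or.inr ⟨i, hi, kv, hkv, hsw, hx⟩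

theorem extract_patterns_from_query_py_spec : Claim_equal_extract_patterns_from_query_py := by
  intro query _
  show extract_patterns_from_query_py query = extract_patterns_from_query_py_alt query
  set q := PySem.Str.lower query with hq
  set b1 := ["calculate", "compute", "add", "sum", "multiply"].any
      (fun term => PySem.Str.isIn term q) with hb1
  set b2 := ["filter", "find", "where", "condition"].any
      (fun term => PySem.Str.isIn term q) with hb2
  set b3 := ["file", "read", "write", "save", "load"].any
      (fun term => PySem.Str.isIn term q) with hb3
  set b4 := ["error", "exception", "handle", "try"].any
      (fun term => PySem.Str.isIn term q) with hb4
  set b5 := ["string", "text", "format", "concat"].any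
      (fun term => PySem.Str.isIn term q) with hb5
  set b6 := ["list", "array", "collection", "items"].any
      (fun term => PySem.Str.isIn term q) with hb6
  have hA : extract_patterns_from_query_py query = pvOut b1 b2 b3 b4 b5 b6 := by
    rw [extract_patterns_from_query_py, pvOut]
    rw [← hq, ← hb1, ← hb2, ← hb3, ← hb4, ← hb5, ← hb6]
    cases b1 <;> cases b2 <;> cases b3 <;> cases b4 <;> cases b5 <;> cases b6 <;> rfl
  have hB : extract_patterns_from_query_py_alt query = pvOut b1 b2 b3 b4 b5 b6 := by
    simp only [extract_patterns_from_query_py_alt]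
    rw [← hq]
    have key : ∀ (x : String) (terms : List String),
        (∀ kv ∈ pvKeywordKey, x = kv.2 → kv.1 ∈ terms) →
        (∀ t ∈ terms, ∃ kv ∈ pvKeywordKey, kv.1 = t ∧ x = kv.2) →
        (PySem.Set.contains
          ((List.range q.toList.length).foldl
            (fun hit i =>
              pvKeywordKey.foldl
                (fun hit kv =>
                  if PySem.Chars.startswith (q.toList.drop i) kv.1.toList then
                    PySem.Set.add hit kv.2
                  else hit)
                hit)
            PySem.Set.empty) x)
          = terms.any (fun term => PySem.Str.isIn term q) := by
      intro x terms h1 h2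
      rw [Bool.eq_iff_iff, pv_hit_contains]
      rw [List.any_eq_true]
      constructor
      · rintro ⟨kv, hkv, hx, hin⟩
        exact ⟨kv.1, h1 kv hkv hx, by simpa [PySem.Str.isIn_eq] using hin⟩
      · rintro ⟨t, ht, hin⟩
        obtain ⟨kv, hkv, rfl, hx⟩ := h2 t ht
        exact ⟨kv, hkv, hx, by simpa [PySem.Str.isIn_eq] using hin⟩
    rw [hb1, hb2, hb3, hb4, hb5, hb6]
    simp only [pvKeys, List.filter_cons, List.filter_nil]
    rw [key "transforms_data" ["calculate", "compute", "add", "sum", "multiply"]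
          (by decide) (by decide),
        key "filters_data" ["filter", "find", "where", "condition"]
          (by decide) (by decide),
        key "performs_io" ["file", "read", "write", "save", "load"]
          (by decide) (by decide),
        key "handles_errors" ["error", "exception", "handle", "try"]
          (by decide) (by decide),
        key "manipulates_strings" ["string", "text", "format", "concat"]
          (by decide) (by decide),
        key "uses_functional_patterns" ["list", "array", "collection", "items"]
          (by decide) (by decide)]
    rw [← hb1, ← hb2, ← hb3, ← hb4, ← hb5, ← hb6]
    cases b1 <;> cases b2 <;> cases b3 <;> cases b4 <;> cases b5 <;> cases b6 <;>
      simp only [if_true, pvOut] <;>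
      rw [pv_items_fold _ (by decide)] <;> rfl
  rw [hA, hB]
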